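-- pv_equiv track=rewrite | github.com/Harshini511/Artificial-Intelligence-Lab | Exercise-4/A4.py | min_successor
-- ===== SOURCE A (Python) =====
-- def manhattan(a,c):
--   return (abs(a[0]-c[0])+abs(a[1]-c[1]))
--
-- def heuristics(points,c):
--   h=0
--   for a in points:
--     h+=manhattan(a,c)
--   return h
--
-- def min_successor(points,l,c):
--   min_value=heuristics(points,c)
--   state= c
--
--   for i in l:
--     h=heuristics(points,i)
--     if h<min_value:
--       min_value=h
--       state=i
--
--   return min_value,state
-- ===== SOURCE B (Python) =====
-- # Faster exact re-implementation: sort the x- and y-coordinates once, build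
-- # prefix sums, and evaluate each candidate's Manhattan-distance sum in
-- # O(log n) by binary search instead of an O(n) inner scan.
-- from bisect import bisect_left
--
--
-- def _prefix(xs):
--     pre = [0]
--     for v in xs:
--         pre.append(pre[-1] + v)
--     return pre
--
--
-- def min_successor(points, l, c):
--     xs = sorted(p[0] for p in points)
--     ys = sorted(p[1] for p in points)
--     px = _prefix(xs)
--     py = _prefix(ys)
--     n = len(points)
--
--     def cost1(arr, pre, v):
--         k = bisect_left(arr, v)
--         return v * k - pre[k] + (pre[n] - pre[k]) - v * (n - k)
--
--     def cost(p):
--         return cost1(xs, px, p[0]) + cost1(ys, py, p[1])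
--
--     min_value = cost(c)
--     state = c
--     for i in l:
--         h = cost(i)
--         if h < min_value:
--             min_value = h
--             state = i
--     return min_value, state
-- ===== Notes on version B (the rewrite author's own statement) =====
-- stated objective: faster
-- what changed: Instead of rescanning all points to sum Manhattan distances for every candidate, B sorts the x- and y-coordinates once, builds prefix sums, and computes each candidate's distance sum with a binary search in O(log n).
import Mathlib
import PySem

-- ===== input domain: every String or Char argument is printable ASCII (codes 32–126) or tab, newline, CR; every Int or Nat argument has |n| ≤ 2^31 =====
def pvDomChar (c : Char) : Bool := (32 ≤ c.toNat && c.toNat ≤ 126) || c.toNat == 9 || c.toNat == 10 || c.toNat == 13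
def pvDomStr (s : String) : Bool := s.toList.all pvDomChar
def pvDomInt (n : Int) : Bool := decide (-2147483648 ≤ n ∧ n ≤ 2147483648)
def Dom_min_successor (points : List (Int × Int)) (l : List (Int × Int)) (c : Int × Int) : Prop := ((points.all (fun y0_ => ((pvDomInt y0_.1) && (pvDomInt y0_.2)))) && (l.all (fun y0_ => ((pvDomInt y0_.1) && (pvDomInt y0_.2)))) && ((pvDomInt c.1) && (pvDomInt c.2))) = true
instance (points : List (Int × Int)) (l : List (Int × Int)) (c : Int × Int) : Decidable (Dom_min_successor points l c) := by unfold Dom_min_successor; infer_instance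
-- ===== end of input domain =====

-- B replaces A's O(n) inner distance-sum scan per candidate by sorted coordinates,
-- prefix sums and a binary search per candidate (objective: faster, asymptotic).

-- ===== PORT A =====
def manhattan (a c : Int × Int) : Int := |a.1 - c.1| + |a.2 - c.2|

def heuristics (points : List (Int × Int)) (c : Int × Int) : Int :=
  points.foldl (fun h a => h + manhattan a c) 0

def min_successor (points : List (Int × Int)) (l : List (Int × Int)) (c : Int × Int) : Int × (Int × Int) :=
  l.foldl (fun acc i =>
    let h := heuristics points i
    if h < acc.1 then (h, i) else acc)
    (heuristics points c, c)

-- ===== PORT B =====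
-- the `for v in xs: pre.append(pre[-1]+v)` loop of _prefix, as the structural
-- recursion producing the appended tail (s = the running last element pre[-1])
def prefTail (s : Int) : List Int → List Int
  | [] => []
  | v :: t => (s + v) :: prefTail (s + v) t

def prefixOf (xs : List Int) : List Int := 0 :: prefTail 0 xs

-- cost1(arr, pre, v) of Source B; pre[k] is in range whenever python's is
def costOne (arr pre : List Int) (n : Nat) (v : Int) : Int :=
  let k := PySem.List.bisectLeft arr v
  v * (k : Int) - pre.getD k 0 + (pre.getD n 0 - pre.getD k 0) - v * ((n : Int) - (k : Int))

def min_successor_alt (points : List (Int × Int)) (l : List (Int × Int)) (c : Int × Int) : Int × (Int × Int) :=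
  let xs := PySem.List.sorted (points.map Prod.fst) (fun x => x) false
  let ys := PySem.List.sorted (points.map Prod.snd) (fun x => x) false
  let px := prefixOf xs
  let py := prefixOf ys
  let n := points.length
  let cost := fun (p : Int × Int) => costOne xs px n p.1 + costOne ys py n p.2
  l.foldl (fun acc i =>
    let h := cost i
    if h < acc.1 then (h, i) else acc)
    (cost c, c)

-- ===== PRECONDITION & SPEC =====
def Spec_min_successor (points : List (Int × Int)) (l : List (Int × Int)) (c : Int × Int) (out : Int × (Int × Int)) : Prop := out = min_successor_alt points l c
instance (points : List (Int × Int)) (l : List (Int × Int)) (c : Int × Int) (out : Int × (Int × Int)) : Decidable (Spec_min_successor points l c out) := by unfold Spec_min_successor; infer_instance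

-- ===== CLAIM (what is proved, stated in full; the proofs are below) =====
def Claim_equal_min_successor : Prop := ∀ (points : List (Int × Int)) (l : List (Int × Int)) (c : Int × Int), Dom_min_successor points l c → Spec_min_successor points l c (min_successor points l c)

-- ===== LEMMAS AND PROOFS =====

theorem prefTail_getD (xs : List Int) (s : Int) (k : Nat) (hk : k < xs.length) :
    (prefTail s xs).getD k 0 = s + (xs.take (k + 1)).sum := by
  induction xs generalizing s k with
  | nil => simp at hk
  | cons v t ih =>
    cases k with
    | zero => simp [prefTail]
    | succ j =>
      simp only [prefTail, List.getD_cons_succ, List.take_succ_cons, List.sum_cons]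
      rw [ih (s + v) j (by simpa using hk)]
      ring

theorem prefixOf_getD (xs : List Int) (k : Nat) (hk : k ≤ xs.length) :
    (prefixOf xs).getD k 0 = (xs.take k).sum := by
  cases k with
  | zero => simp [prefixOf]
  | succ j =>
    simp only [prefixOf, List.getD_cons_succ]
    rw [prefTail_getD xs 0 j (by omega)]
    simp

theorem sum_map_abs_lt (L : List Int) (v : Int) (h : ∀ x ∈ L, x < v) :
    (L.map (fun x => |x - v|)).sum = v * (L.length : Int) - L.sum := by
  induction L with
  | nil => simp
  | cons a t ih =>
    have ha : a < v := h a (by simp)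
    have : |a - v| = v - a := by rw [abs_of_nonpos (by omega)]; ring
    simp only [List.map_cons, List.sum_cons, List.length_cons, this,
      ih (fun x hx => h x (by simp [hx]))]
    push_cast; ring

theorem sum_map_abs_ge (L : List Int) (v : Int) (h : ∀ x ∈ L, v ≤ x) :
    (L.map (fun x => |x - v|)).sum = L.sum - v * (L.length : Int) := by
  induction L with
  | nil => simp
  | cons a t ih =>
    have ha : v ≤ a := h a (by simp)
    have : |a - v| = a - v := abs_of_nonneg (by omega)
    simp only [List.map_cons, List.sum_cons, List.length_cons, this,
      ih (fun x hx => h x (by simp [hx]))]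
    push_cast; ring

theorem costOne_eq (L : List Int) (v : Int) :
    costOne (PySem.List.sorted L (fun x => x) false) (prefixOf (PySem.List.sorted L (fun x => x) false)) L.length v
      = (L.map (fun x => |x - v|)).sum := by
  set arr := PySem.List.sorted L (fun x => x) false with harr
  have hperm : arr.Perm L := PySem.List.sorted_perm L (fun x => x) false
  have hlen : arr.length = L.length := hperm.length_eq
  have hpw : arr.Pairwise (· ≤ ·) := by
    simpa using PySem.List.sorted_pairwise L (fun x => x)
  obtain ⟨hkle, hlt, hge⟩ := PySem.List.bisectLeft_spec arr v hpw
  set k := PySem.List.bisectLeft arr v with hk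
  -- prefix-sum values
  have hpk : (prefixOf arr).getD k 0 = (arr.take k).sum := prefixOf_getD arr k hkle
  have hpn : (prefixOf arr).getD L.length 0 = arr.sum := by
    rw [prefixOf_getD arr L.length hlen.ge]
    rw [List.take_of_length_le hlen.le]
  -- split arr at k
  have hsplit : arr = arr.take k ++ arr.drop k := (List.take_append_drop k arr).symm
  have htk : ∀ x ∈ arr.take k, x < v := by
    intro x hx
    obtain ⟨i, hi, hx⟩ := List.mem_iff_getElem.mp hx
    have hi' : i < arr.length := by simp at hi; omega
    have : (arr.take k)[i]'hi = arr[i]'hi' := List.getElem_take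
    rw [this] at hx
    exact hx ▸ hlt i hi' (by simp at hi; omega)
  have hdk : ∀ x ∈ arr.drop k, v ≤ x := by
    intro x hx
    obtain ⟨i, hi, hx⟩ := List.mem_iff_getElem.mp hx
    have hi' : k + i < arr.length := by simp at hi; omega
    have : (arr.drop k)[i]'hi = arr[k + i]'hi' := List.getElem_drop
    rw [this] at hx
    exact hx ▸ hge (k + i) hi' (by omega)
  have hsum : (L.map (fun x => |x - v|)).sum = (arr.map (fun x => |x - v|)).sum :=
    ((hperm.map _).sum_eq).symm
  have hlen_take : (arr.take k).length = k := by simp; omega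
  have hlen_drop : (arr.drop k).length = arr.length - k := by simp
  have hsums : arr.sum = (arr.take k).sum + (arr.drop k).sum := by
    conv_lhs => rw [hsplit]
    simp
  rw [hsum]
  conv_rhs => rw [hsplit]
  rw [List.map_append, List.sum_append,
    sum_map_abs_lt _ v htk, sum_map_abs_ge _ v hdk, hlen_take, hlen_drop]
  simp only [costOne, ← hk, hpk, hpn, hsums]
  have : ((arr.length - k : Nat) : Int) = (L.length : Int) - (k : Int) := by
    push_cast [hlen.symm]; omega
  rw [this]
  ring

theorem foldl_add_sum (L : List Int) (s : Int) :
    L.foldl (fun h a => h + a) s = s + L.sum := by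
  induction L generalizing s with
  | nil => simp
  | cons a t ih => simp [List.foldl_cons, ih]; ring

theorem heuristics_eq (points : List (Int × Int)) (p : Int × Int) :
    heuristics points p
      = ((points.map Prod.fst).map (fun x => |x - p.1|)).sum
        + ((points.map Prod.snd).map (fun y => |y - p.2|)).sum := by
  induction points with
  | nil => simp [heuristics]
  | cons a t ih =>
    simp only [heuristics, List.foldl_cons] at *
    have step : ∀ (s : Int), t.foldl (fun h a => h + manhattan a p) s
        = s + t.foldl (fun h a => h + manhattan a p) 0 := by
      intro s
      rw [show (fun h a => h + manhattan a p) = (fun h a => h + (fun a => manhattan a p) a) from rfl,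
        ← List.foldl_map, ← List.foldl_map (f := fun a => manhattan a p),
        foldl_add_sum, foldl_add_sum]
      simp
    rw [step (0 + manhattan a p), ih]
    simp [manhattan]
    ring

theorem cost_eq (points : List (Int × Int)) (p : Int × Int) :
    costOne (PySem.List.sorted (points.map Prod.fst) (fun x => x) false)
        (prefixOf (PySem.List.sorted (points.map Prod.fst) (fun x => x) false)) points.length p.1
      + costOne (PySem.List.sorted (points.map Prod.snd) (fun x => x) false)
        (prefixOf (PySem.List.sorted (points.map Prod.snd) (fun x => x) false)) points.length p.2
      = heuristics points p := by
  have h1 := costOne_eq (points.map Prod.fst) p.1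
  have h2 := costOne_eq (points.map Prod.snd) p.2
  rw [heuristics_eq]
  simp only [List.length_map] at h1 h2
  rw [h1, h2]

theorem foldl_sel_congr (f g : (Int × Int) → Int) (hfg : ∀ p, f p = g p)
    (l : List (Int × Int)) (acc : Int × (Int × Int)) :
    l.foldl (fun acc i => let h := f i; if h < acc.1 then (h, i) else acc) acc
      = l.foldl (fun acc i => let h := g i; if h < acc.1 then (h, i) else acc) acc := by
  induction l generalizing acc with
  | nil => rfl
  | cons a t ih => simp only [List.foldl_cons, hfg a]; exact ih _

-- ===== VERDICT (by name: the statement is the Claim_ definition above) =====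
theorem min_successor_spec : Claim_equal_min_successor := by
  intro points l c _
  unfold Spec_min_successor min_successor
  dsimp only [min_successor_alt]
  rw [foldl_sel_congr (fun i => heuristics points i)
    (fun p => costOne (PySem.List.sorted (points.map Prod.fst) (fun x => x) false)
        (prefixOf (PySem.List.sorted (points.map Prod.fst) (fun x => x) false)) points.length p.1
      + costOne (PySem.List.sorted (points.map Prod.snd) (fun x => x) false)
        (prefixOf (PySem.List.sorted (points.map Prod.snd) (fun x => x) false)) points.length p.2)
    (fun p => (cost_eq points p).symm), cost_eq points c]
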